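-- pv_equiv track=rewrite | github.com/jctanner/cosim | scenarios/company-simulator-team/gitlab/company-simulator/files/lib/orchestrator.py | _parse_commit_files
-- ===== SOURCE A (Python) =====
-- def _parse_commit_files(body: str) -> list[dict]:
--     """Parse COMMIT body into list of {path, content} dicts.
--
--     Body is delimited by `FILE: <path>` lines. Each FILE: starts a new file;
--     content until the next FILE: or end-of-block is that file's body.
--     """
--     files = []
--     current_path = None
--     current_lines: list[str] = []
--
--     for line in body.split("\n"):
--         if line.startswith("FILE: "):
--             if current_path is not None:
--                 files.append({"path": current_path, "content": "\n".join(current_lines).strip()})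
--             current_path = line[6:].strip()
--             current_lines = []
--         else:
--             current_lines.append(line)
--
--     if current_path is not None:
--         files.append({"path": current_path, "content": "\n".join(current_lines).strip()})
--
--     return files
-- ===== SOURCE B (Python) =====
-- def _parse_commit_files(body: str) -> list[dict]:
--     """Two-phase: skip the prefix before the first `FILE: ` marker, then
--     repeatedly span off one marker-plus-content chunk until lines run out."""
--     def span(lines):
--         # (lines before the first FILE: marker, lines from that marker on)
--         for k, ln in enumerate(lines):
--             if ln.startswith("FILE: "):
--                 return lines[:k], lines[k:]
--         return lines, []
--
--     files = []
--     _, lines = span(body.split("\n"))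
--     while lines:
--         head = lines[0]
--         content, lines = span(lines[1:])
--         files.append({"path": head[6:].strip(),
--                       "content": "\n".join(content).strip()})
--     return files
-- ===== Notes on version B (the rewrite author's own statement) =====
-- stated objective: alternative
-- what changed: Replaced A's single streaming loop with (files, current_path, current_lines) accumulator state by a two-phase span decomposition: skip the lines before the first file marker, then repeatedly split off one marker-plus-content chunk until the lines run out.
import Mathlib
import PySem

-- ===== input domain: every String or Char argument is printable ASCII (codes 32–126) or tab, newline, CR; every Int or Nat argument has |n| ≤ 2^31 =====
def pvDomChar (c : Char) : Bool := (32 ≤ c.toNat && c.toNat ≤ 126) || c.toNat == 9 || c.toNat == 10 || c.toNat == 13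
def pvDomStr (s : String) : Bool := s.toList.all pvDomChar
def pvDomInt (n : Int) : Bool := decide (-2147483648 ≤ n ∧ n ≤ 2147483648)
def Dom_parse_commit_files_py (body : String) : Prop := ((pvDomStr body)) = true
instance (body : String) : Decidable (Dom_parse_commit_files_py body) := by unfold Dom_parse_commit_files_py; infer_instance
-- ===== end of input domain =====

-- B replaces A's streaming accumulator with a two-phase span decomposition (skip the
-- prefix, then repeatedly split off one marker+content chunk); objective: alternative.

-- shared dict/value builders (both Pythons build the same literal dict)
def pvEntry (p : String) (buf : List String) : List (String × String) :=
  [("path", p), ("content", PySem.Str.strip (PySem.Str.join "\n" buf))]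

def pvPathOf (line : String) : String :=
  PySem.Str.strip (PySem.Str.slice line (some 6) none)

-- ===== PORT A =====
-- A's loop body: state = (files, current_path, current_lines)
def pvStepA (st : List (List (String × String)) × Option String × List String)
    (line : String) : List (List (String × String)) × Option String × List String :=
  if PySem.Str.startswith line "FILE: " then
    match st.2.1 with
    | some p => (st.1 ++ [pvEntry p st.2.2], some (pvPathOf line), [])
    | none => (st.1, some (pvPathOf line), [])
  else (st.1, st.2.1, st.2.2 ++ [line])

-- A's final flush after the loop
def pvFinishA (st : List (List (String × String)) × Option String × List String) :
    List (List (String × String)) :=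
  match st.2.1 with
  | some p => st.1 ++ [pvEntry p st.2.2]
  | none => st.1

def parse_commit_files_py (body : String) : List (List (String × String)) :=
  pvFinishA (((PySem.Str.split? body "\n").getD []).foldl pvStepA ([], none, []))

-- ===== PORT B =====
def pvIsMarker (ln : String) : Bool := PySem.Str.startswith ln "FILE: "

-- Source B's span: (lines before the first marker, lines from that marker on)
def pvSpanB : List String → List String × List String
  | [] => ([], [])
  | l :: ls =>
    if pvIsMarker l then ([], l :: ls)
    else
      let r := pvSpanB ls
      (l :: r.1, r.2)

-- termination fact for the while loop below (cited in decreasing_by)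
theorem pvSpanB_snd_length_le (ls : List String) : (pvSpanB ls).2.length ≤ ls.length := by
  induction ls with
  | nil => simp [pvSpanB]
  | cons l ls ih =>
    simp only [pvSpanB]
    split
    · simp
    · exact Nat.le_succ_of_le ih

-- Source B's while loop, accumulating `files`
def pvGoB (files : List (List (String × String))) :
    List String → List (List (String × String))
  | [] => files
  | head :: ls =>
    let cr := pvSpanB ls
    pvGoB (files ++ [pvEntry (pvPathOf head) cr.1]) cr.2
  termination_by lines => lines.length
  decreasing_by
    exact Nat.lt_succ_of_le (pvSpanB_snd_length_le ls)

def parse_commit_files_py_alt (body : String) : List (List (String × String)) :=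
  pvGoB [] (pvSpanB ((PySem.Str.split? body "\n").getD [])).2

-- ===== PRECONDITION & SPEC =====
def Spec_parse_commit_files_py (body : String) (out : List (List (String × String))) : Prop := out = parse_commit_files_py_alt body
instance (body : String) (out : List (List (String × String))) : Decidable (Spec_parse_commit_files_py body out) := by unfold Spec_parse_commit_files_py; infer_instance

-- ===== CLAIM (what is proved, stated in full; the proofs are below) =====
def Claim_equal_parse_commit_files_py : Prop := ∀ (body : String), Dom_parse_commit_files_py body → Spec_parse_commit_files_py body (parse_commit_files_py body)

-- ===== LEMMAS AND PROOFS =====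

theorem pvSpanB_eq (ls : List String) :
    pvSpanB ls = (ls.takeWhile (fun l => !pvIsMarker l), ls.dropWhile (fun l => !pvIsMarker l)) := by
  induction ls with
  | nil => simp [pvSpanB]
  | cons l ls ih =>
    simp only [pvSpanB, List.takeWhile_cons, List.dropWhile_cons]
    by_cases h : pvIsMarker l <;> simp [h, ih]

-- A's loop from a `some p` state produces the pending entry and then B's chunks
theorem pvLoop_some (lines : List String) :
    ∀ (files : List (List (String × String))) (p : String) (buf : List String),
      pvFinishA (lines.foldl pvStepA (files, some p, buf)) =
        pvGoB (files ++ [pvEntry p (buf ++ lines.takeWhile (fun l => !pvIsMarker l))])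
          (lines.dropWhile (fun l => !pvIsMarker l)) := by
  induction lines with
  | nil => intro files p buf; simp [pvFinishA, pvGoB]
  | cons l ls ih =>
    intro files p buf
    by_cases h : pvIsMarker l
    · have h' : PySem.Str.startswith l "FILE: " = true := h
      simp only [List.foldl_cons, pvStepA, h', if_true, List.takeWhile_cons,
        List.dropWhile_cons, h, Bool.not_true, Bool.false_eq_true, if_false]
      rw [ih (files ++ [pvEntry p buf]) (pvPathOf l) []]
      simp [pvGoB, pvSpanB_eq]
    · have h' : PySem.Str.startswith l "FILE: " = false := by
        simpa [pvIsMarker] using h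
      simp only [List.foldl_cons, pvStepA, h', Bool.false_eq_true, if_false,
        List.takeWhile_cons, List.dropWhile_cons, h, Bool.not_false]
      rw [ih files p (buf ++ [l])]
      simp

-- A's loop from the initial `none` state is exactly B's skip-prefix-then-chunks
theorem pvLoop_none (lines : List String) :
    ∀ (buf : List String),
      pvFinishA (lines.foldl pvStepA ([], none, buf)) =
        pvGoB [] (lines.dropWhile (fun l => !pvIsMarker l)) := by
  induction lines with
  | nil => intro buf; simp [pvFinishA, pvGoB]
  | cons l ls ih =>
    intro buf
    by_cases h : pvIsMarker l
    · have h' : PySem.Str.startswith l "FILE: " = true := h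
      simp only [List.foldl_cons, pvStepA, h', if_true, List.dropWhile_cons, h,
        Bool.not_true, Bool.false_eq_true, if_false]
      rw [pvLoop_some ls [] (pvPathOf l) []]
      simp [pvGoB, pvSpanB_eq]
    · have h' : PySem.Str.startswith l "FILE: " = false := by
        simpa [pvIsMarker] using h
      simp only [List.foldl_cons, pvStepA, h', Bool.false_eq_true, if_false,
        List.dropWhile_cons, h, Bool.not_false]
      exact ih (buf ++ [l])

-- ===== VERDICT (by name: the statement is the Claim_ definition above) =====
theorem parse_commit_files_py_spec : Claim_equal_parse_commit_files_py := by
  intro body _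
  unfold Spec_parse_commit_files_py parse_commit_files_py parse_commit_files_py_alt
  rw [pvLoop_none, pvSpanB_eq]
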